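-- pv_equiv track=rewrite | github.com/hedb/misc_py | euler_386.py | count_options
-- ===== SOURCE A (Python) =====
-- def count_options(position_limit,total):
--
--     if len(position_limit) == 0 or total <= 0:
--         if total == 0:
--             return 1
--         else:
--             return 0
--     ret = 0
--     for i in range(position_limit[0],-1,-1):
--         ret += count_options(position_limit[1:],total-i)
--     return ret
-- ===== SOURCE B (Python) =====
-- def count_options(position_limit, total):
--     # Forward DP over positions: a dict maps each still-reachable remaining
--     # total (>0) to the number of prefixes leading to it; 'done' accumulates
--     # completed selections.  Replaces A's exponential recursion.
--     if total == 0: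
--         return 1
--     if total < 0:
--         return 0
--     done = 0
--     cur = {total: 1}
--     for limit in position_limit:
--         nxt = {}
--         for r, c in cur.items():
--             if limit >= r:
--                 done += c
--             for i in range(min(limit, r - 1) + 1):
--                 nxt[r - i] = nxt.get(r - i, 0) + c
--         cur = nxt
--     return done
-- ===== Notes on version B (the rewrite author's own statement) =====
-- stated objective: alternative
-- what changed: Replaces A's depth-first recursion that branches over every value of every position with a single forward pass keeping a dict from each still-reachable remaining total to its multiplicity, so equal remainders are merged and counted once.
import Mathlib
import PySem

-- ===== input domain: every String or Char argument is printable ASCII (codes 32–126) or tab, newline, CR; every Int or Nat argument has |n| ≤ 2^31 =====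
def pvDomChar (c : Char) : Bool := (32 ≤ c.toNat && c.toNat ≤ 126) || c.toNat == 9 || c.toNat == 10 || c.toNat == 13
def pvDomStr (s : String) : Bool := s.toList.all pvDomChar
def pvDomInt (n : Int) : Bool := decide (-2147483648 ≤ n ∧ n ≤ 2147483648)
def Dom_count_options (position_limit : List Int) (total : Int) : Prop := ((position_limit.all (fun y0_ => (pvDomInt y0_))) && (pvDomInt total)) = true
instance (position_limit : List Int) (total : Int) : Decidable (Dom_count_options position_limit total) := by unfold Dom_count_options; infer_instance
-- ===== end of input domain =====

-- B replaces A's branching recursion by a forward dynamic programme over the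
-- positions, keyed by the remaining total, merging equal remainders
-- (objective: alternative algorithm).

-- ===== PORT A =====
def count_options (position_limit : List Int) (total : Int) : Int :=
  match position_limit with
  | [] => if total = 0 then 1 else 0
  | _ :: rest =>
    if total ≤ 0 then (if total = 0 then 1 else 0)
    else (PySem.List.pyRange (position_limit.headI) (-1) (-1)).foldl
      (fun ret i => ret + count_options rest (total - i)) 0

-- ===== PORT B =====
-- body of "for r, c in cur.items(): …"  (st2 = (done, nxt))
def coInner (limit : Int) (st2 : Int × PySem.Dict Int Int) (rc : Int × Int) :
    Int × PySem.Dict Int Int :=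
  ((if rc.1 ≤ limit then st2.1 + rc.2 else st2.1),
   (PySem.List.pyRange 0 (min limit (rc.1 - 1) + 1) 1).foldl
     (fun nd i => nd.insert (rc.1 - i) (nd.getD (rc.1 - i) 0 + rc.2)) st2.2)

-- body of "for limit in position_limit: …"  (st = (done, cur))
def coOuter (st : Int × PySem.Dict Int Int) (limit : Int) : Int × PySem.Dict Int Int :=
  st.2.items.foldl (coInner limit) (st.1, PySem.Dict.mk [])

def count_options_alt (position_limit : List Int) (total : Int) : Int :=
  if total = 0 then 1
  else if total < 0 then 0
  else (position_limit.foldl coOuter (0, PySem.Dict.mk [(total, 1)])).1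

-- ===== PRECONDITION & SPEC =====
def Spec_count_options (position_limit : List Int) (total : Int) (out : Int) : Prop := out = count_options_alt position_limit total
instance (position_limit : List Int) (total : Int) (out : Int) : Decidable (Spec_count_options position_limit total out) := by unfold Spec_count_options; infer_instance

-- ===== CLAIM (what is proved, stated in full; the proofs are below) =====
def Claim_equal_count_options : Prop := ∀ (position_limit : List Int) (total : Int), Dom_count_options position_limit total → Spec_count_options position_limit total (count_options position_limit total)

-- ===== LEMMAS AND PROOFS =====

-- weighted sum of a dict's items list: Σ value * g key
def wsum (g : Int → Int) (l : List (Int × Int)) : Int :=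
  (l.map (fun p => p.2 * g p.1)).sum

theorem wsum_cons (g : Int → Int) (p : Int × Int) (l : List (Int × Int)) :
    wsum g (p :: l) = p.2 * g p.1 + wsum g l := by simp [wsum]

theorem wsum_append (g : Int → Int) (l l' : List (Int × Int)) :
    wsum g (l ++ l') = wsum g l + wsum g l' := by simp [wsum]

-- A on a nonpositive total
theorem A_le_zero (L : List Int) (t : Int) (h : t ≤ 0) :
    count_options L t = if t = 0 then 1 else 0 := by
  cases L <;> simp [count_options, h]

-- sum of A rest (r - i) over the out-of-budget half i ∈ [min ℓ (r-1) + 1, ℓ]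
theorem tail_sum (rest : List Int) (r ℓ : Int) :
    ((PySem.List.pyRange (min ℓ (r-1) + 1) (ℓ+1) 1).map
      (fun i => count_options rest (r - i))).sum = if r ≤ ℓ then 1 else 0 := by
  by_cases hle : r ≤ ℓ
  · have hmin : min ℓ (r-1) = r - 1 := by omega
    rw [hmin]
    have hcons : PySem.List.pyRange r (ℓ+1) 1 = r :: PySem.List.pyRange (r+1) (ℓ+1) 1 :=
      PySem.List.pyRange_one_cons (by omega)
    have : r - 1 + 1 = r := by ring
    rw [this, hcons]
    simp only [List.map_cons, List.sum_cons]
    have hz : ((PySem.List.pyRange (r+1) (ℓ+1) 1).map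
        (fun i => count_options rest (r - i))).sum = 0 := by
      apply List.sum_eq_zero
      intro x hx
      simp only [List.mem_map] at hx
      obtain ⟨i, hi, rfl⟩ := hx
      rw [PySem.List.mem_pyRange_one] at hi
      rw [A_le_zero rest (r - i) (by omega)]
      simp only [if_neg (by omega : ¬ r - i = 0)]
    rw [hz, sub_self, A_le_zero rest 0 le_rfl]
    simp [hle]
  · have hmin : min ℓ (r-1) = ℓ := by omega
    rw [hmin, PySem.List.pyRange_one_eq_nil (by omega)]
    simp [show ¬ r ≤ ℓ by omega]

-- A unfolded on a cons, for positive remaining total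
theorem A_cons (ℓ : Int) (rest : List Int) (r : Int) (h1 : 1 ≤ r) :
    count_options (ℓ :: rest) r =
      (if r ≤ ℓ then 1 else 0) +
      ((PySem.List.pyRange 0 (min ℓ (r-1) + 1) 1).map
        (fun i => count_options rest (r - i))).sum := by
  have hpos : ¬ r ≤ 0 := by omega
  rw [count_options]
  simp only [List.headI, if_neg hpos]
  by_cases hneg : ℓ ≤ -1
  · rw [PySem.List.pyRange_neg_one_eq_nil (by omega)]
    have hm : min ℓ (r-1) = ℓ := by omega
    rw [hm, PySem.List.pyRange_one_eq_nil (by omega)]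
    simp [show ¬ r ≤ ℓ by omega]
  · have h0 : (0:Int) ≤ ℓ := by omega
    rw [PySem.List.pyRange_neg_one_eq_reverse]
    rw [List.foldl_reverse]
    have hfold : ∀ (l : List Int) (init : Int),
        l.foldr (fun i ret => ret + count_options rest (r - i)) init
          = init + (l.map (fun i => count_options rest (r - i))).sum := by
      intro l
      induction l with
      | nil => intro init; simp
      | cons x l ih => intro init; simp [ih]; ring
    rw [hfold]
    have hsplit : PySem.List.pyRange (-1 + 1) (ℓ + 1) 1 =
        PySem.List.pyRange 0 (min ℓ (r-1) + 1) 1 ++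
        PySem.List.pyRange (min ℓ (r-1) + 1) (ℓ + 1) 1 := by
      have : (-1 : Int) + 1 = 0 := by ring
      rw [this]
      exact PySem.List.pyRange_one_append 0 (min ℓ (r-1) + 1) (ℓ+1) (by omega) (by omega)
    rw [hsplit, List.map_append, List.sum_append, tail_sum rest r ℓ]
    ring

-- replacing the value at an existing key bumps the weighted sum by c * g k
theorem wsum_replace (g : Int → Int) (k v c : Int) :
    ∀ (l : List (Int × Int)), (l.map Prod.fst).Nodup → (k, v) ∈ l →
    wsum g (l.map (fun p => if p.1 == k then (k, v + c) else p)) = wsum g l + c * g k := by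
  intro l
  induction l with
  | nil => simp
  | cons p l ih =>
    intro hn hm
    simp only [List.map_cons, List.nodup_cons] at hn
    rcases List.mem_cons.mp hm with rfl | hm'
    · simp only [List.map_cons, beq_self_eq_true, if_pos, wsum_cons]
      have htail : l.map (fun p => if p.1 == k then (k, v + c) else p) = l.map id := by
        apply List.map_congr_left
        intro q hq
        have hq1 : q.1 ≠ k := by
          intro h
          exact hn.1 (h ▸ List.mem_map.mpr ⟨q, hq, rfl⟩)
        simp [hq1]
      rw [htail, List.map_id]
      ring_nf
    · have hkin : k ∈ l.map Prod.fst := List.mem_map.mpr ⟨(k, v), hm', rfl⟩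
      have hpk : p.1 ≠ k := fun h => hn.1 (h ▸ hkin)
      have hbeq : (p.1 == k) = false := beq_eq_false_iff_ne.mpr hpk
      simp only [List.map_cons, wsum_cons, hbeq, Bool.false_eq_true, if_false]
      rw [ih hn.2 hm']
      ring

theorem wsum_insert_bump (g : Int → Int) (d : PySem.Dict Int Int) (k c : Int)
    (hn : d.keys.Nodup) :
    wsum g (d.insert k (d.getD k 0 + c)).items = wsum g d.items + c * g k := by
  by_cases h : d.contains k = true
  · obtain ⟨v, hv⟩ : ∃ v, d.get? k = some v := by
      have := PySem.Dict.contains_eq_isSome_get? (d := d) (k := k)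
      rw [h] at this
      exact Option.isSome_iff_exists.mp this.symm
    have hmem : (k, v) ∈ d.items := PySem.Dict.mem_items_of_get?_eq_some d hv
    have hg : d.getD k 0 = v := PySem.Dict.getD_of_get?_eq_some d 0 hv
    rw [PySem.Dict.items_insert_of_contains d _ h, hg]
    exact wsum_replace g k v c d.items (by simpa [PySem.Dict.keys] using hn) hmem
  · rw [PySem.Dict.items_insert_of_not_contains d _ (by simpa using h),
        PySem.Dict.getD_of_not_contains d _ (by simpa using h)]
    rw [wsum_append]
    simp [wsum]

-- the inner accumulation loop "for i in range(min(limit, r-1)+1): nxt[r-i] += c"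
theorem fold_insert_state (g : Int → Int) (key : Int → Int) (c : Int) :
    ∀ (l : List Int) (nd : PySem.Dict Int Int), nd.keys.Nodup →
    (l.foldl (fun nd i => nd.insert (key i) (nd.getD (key i) 0 + c)) nd).keys.Nodup ∧
    (∀ k ∈ (l.foldl (fun nd i => nd.insert (key i) (nd.getD (key i) 0 + c)) nd).keys,
        k ∈ nd.keys ∨ ∃ i ∈ l, k = key i) ∧
    wsum g (l.foldl (fun nd i => nd.insert (key i) (nd.getD (key i) 0 + c)) nd).items
      = wsum g nd.items + c * ((l.map (fun i => g (key i))).sum) := by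
  intro l
  induction l with
  | nil => intro nd hn; refine ⟨hn, fun k hk => Or.inl hk, by simp⟩
  | cons i l ih =>
    intro nd hn
    simp only [List.foldl_cons]
    have hn' : (nd.insert (key i) (nd.getD (key i) 0 + c)).keys.Nodup :=
      PySem.Dict.nodup_keys_insert _ _ _ hn
    obtain ⟨h1, h2, h3⟩ := ih (nd.insert (key i) (nd.getD (key i) 0 + c)) hn'
    refine ⟨h1, ?_, ?_⟩
    · intro k hk
      rcases h2 k hk with hk' | ⟨j, hj, rfl⟩
      · rcases (PySem.Dict.mem_keys_insert _ _ _ _).mp hk' with rfl | hk''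
        · exact Or.inr ⟨i, List.mem_cons_self .., rfl⟩
        · exact Or.inl hk''
      · exact Or.inr ⟨j, List.mem_cons_of_mem _ hj, rfl⟩
    · rw [h3, wsum_insert_bump g nd (key i) c hn]
      simp only [List.map_cons, List.sum_cons]
      ring

-- the loop "for r, c in cur.items(): …"
theorem inner_inv (g : Int → Int) (limit : Int) :
    ∀ (items : List (Int × Int)) (done : Int) (nd : PySem.Dict Int Int),
    nd.keys.Nodup → (∀ k ∈ nd.keys, 1 ≤ k) → (∀ p ∈ items, 1 ≤ p.1) →
    (items.foldl (coInner limit) (done, nd)).2.keys.Nodup ∧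
    (∀ k ∈ (items.foldl (coInner limit) (done, nd)).2.keys, 1 ≤ k) ∧
    (items.foldl (coInner limit) (done, nd)).1
      = done + (items.map (fun p => p.2 * (if p.1 ≤ limit then 1 else 0))).sum ∧
    wsum g (items.foldl (coInner limit) (done, nd)).2.items
      = wsum g nd.items +
        (items.map (fun p => p.2 *
          ((PySem.List.pyRange 0 (min limit (p.1-1) + 1) 1).map (fun i => g (p.1 - i))).sum)).sum := by
  intro items
  induction items with
  | nil => intro done nd hn hpos _; exact ⟨hn, hpos, by simp, by simp⟩
  | cons p items ih =>
    intro done nd hn hpos hitems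
    simp only [List.foldl_cons]
    have hp1 : 1 ≤ p.1 := hitems p (List.mem_cons_self ..)
    obtain ⟨f1, f2, f3⟩ := fold_insert_state g (fun i => p.1 - i) p.2
      (PySem.List.pyRange 0 (min limit (p.1 - 1) + 1) 1) nd hn
    have hstep : coInner limit (done, nd) p =
        ((if p.1 ≤ limit then done + p.2 else done),
         (PySem.List.pyRange 0 (min limit (p.1 - 1) + 1) 1).foldl
           (fun nd i => nd.insert (p.1 - i) (nd.getD (p.1 - i) 0 + p.2)) nd) := rfl
    rw [hstep]
    have hpos' : ∀ k ∈ ((PySem.List.pyRange 0 (min limit (p.1 - 1) + 1) 1).foldl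
        (fun nd i => nd.insert (p.1 - i) (nd.getD (p.1 - i) 0 + p.2)) nd).keys, 1 ≤ k := by
      intro k hk
      rcases f2 k hk with hk' | ⟨i, hi, rfl⟩
      · exact hpos k hk'
      · rw [PySem.List.mem_pyRange_one] at hi
        omega
    obtain ⟨g1, g2, g3, g4⟩ := ih (if p.1 ≤ limit then done + p.2 else done) _ f1 hpos'
      (fun q hq => hitems q (List.mem_cons_of_mem _ hq))
    refine ⟨g1, g2, ?_, ?_⟩
    · rw [g3]
      simp only [List.map_cons, List.sum_cons]
      split_ifs <;> ring
    · rw [g4, f3]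
      simp only [List.map_cons, List.sum_cons]
      ring

-- the outer loop: final 'done' = done + Σ over the dict of count * A(L, remaining)
theorem loop_inv : ∀ (L : List Int) (done : Int) (d : PySem.Dict Int Int),
    d.keys.Nodup → (∀ k ∈ d.keys, 1 ≤ k) →
    (L.foldl coOuter (done, d)).1 = done + wsum (count_options L) d.items := by
  intro L
  induction L with
  | nil =>
    intro done d _ hpos
    simp only [List.foldl_nil]
    have hz : wsum (count_options []) d.items = 0 := by
      apply List.sum_eq_zero
      intro x hx
      simp only [List.mem_map] at hx
      obtain ⟨p, hp, rfl⟩ := hx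
      have h1 : (1:Int) ≤ p.1 := hpos p.1 (List.mem_map.mpr ⟨p, hp, rfl⟩)
      rw [show count_options [] p.1 = if p.1 = 0 then 1 else 0 from rfl]
      simp [show ¬ p.1 = 0 by omega]
    rw [hz]; ring
  | cons ℓ L ih =>
    intro done d hn hpos
    simp only [List.foldl_cons]
    have hOuter : coOuter (done, d) ℓ = d.items.foldl (coInner ℓ) (done, PySem.Dict.mk []) := rfl
    rw [hOuter]
    have hitems : ∀ p ∈ d.items, 1 ≤ p.1 :=
      fun p hp => hpos p.1 (List.mem_map.mpr ⟨p, hp, rfl⟩)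
    obtain ⟨g1, g2, g3, g4⟩ := inner_inv (count_options L) ℓ d.items done (PySem.Dict.mk [])
      (by simp [PySem.Dict.keys]) (by simp [PySem.Dict.keys]) hitems
    rcases hres : d.items.foldl (coInner ℓ) (done, PySem.Dict.mk []) with ⟨done', nd'⟩
    rw [hres] at g1 g2 g3 g4
    rw [show (done', nd').1 = done' from rfl] at g3
    rw [show (done', nd').2 = nd' from rfl] at g1 g2 g4
    have hrec := ih done' nd' g1 g2
    rw [hres] at *
    rw [hrec, g3, g4]
    have hAcons : wsum (count_options (ℓ :: L)) d.items =
        (d.items.map (fun p => p.2 * (if p.1 ≤ ℓ then 1 else 0))).sum +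
        (d.items.map (fun p => p.2 *
          ((PySem.List.pyRange 0 (min ℓ (p.1-1) + 1) 1).map
            (fun i => count_options L (p.1 - i))).sum)).sum := by
      rw [wsum, ← List.sum_map_add]
      apply congrArg
      apply List.map_congr_left
      intro p hp
      rw [A_cons ℓ L p.1 (hitems p hp)]
      ring
    rw [hAcons]
    have hmkz : wsum (count_options L) (PySem.Dict.mk ([] : List (Int × Int))).items = 0 := rfl
    rw [hmkz]
    ring

-- ===== VERDICT (by name: the statement is the Claim_ definition above) =====
theorem count_options_spec : Claim_equal_count_options := by
  intro L t _
  show count_options L t = count_options_alt L t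
  unfold count_options_alt
  by_cases h0 : t = 0
  · subst h0; rw [A_le_zero L 0 le_rfl]; simp
  · by_cases hneg : t < 0
    · rw [A_le_zero L t (by omega)]
      simp [h0, hneg]
    · have ht : 1 ≤ t := by omega
      rw [if_neg h0, if_neg hneg]
      have := loop_inv L 0 (PySem.Dict.mk [(t, 1)])
        (by simp [PySem.Dict.keys]) (by simp [PySem.Dict.keys]; omega)
      rw [this]
      have : wsum (count_options L) (PySem.Dict.mk [(t, 1)]).items = count_options L t := by
        simp [wsum]
      rw [this]
      ring
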